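-- pv_equiv track=rewrite | github.com/mohammadfaiizan/ProjectI | DSA/Problem/Trie/03_Autocomplete_Dictionary_Systems/720_Longest_Word_in_Dictionary.py | longestWord5
-- ===== SOURCE A (Python) =====
-- from typing import List, Set
--
-- def longestWord5(words: List[str]) -> str:
--     """
--     Approach 5: Dynamic Programming with Memoization
--
--     Use DP to cache buildability results.
--
--     Time: O(sum of word lengths)
--     Space: O(number of words)
--     """
--     word_set = set(words)
--     memo = {}
--
--     def can_build_dp(word: str) -> bool:
--         """Check if word can be built using DP"""
--         if word in memo:
--             return memo[word]
--
--         if len(word) == 1: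
--             memo[word] = word in word_set
--             return memo[word]
--
--         # Check if word exists and prefix can be built
--         result = word in word_set and can_build_dp(word[:-1])
--         memo[word] = result
--         return result
--
--     longest = ""
--
--     for word in words:
--         if can_build_dp(word):
--             if len(word) > len(longest) or (len(word) == len(longest) and word < longest):
--                 longest = word
--
--     return longest
-- ===== SOURCE B (Python) =====
-- def longestWord5(words):
--     # Sort words; a word is buildable iff it has length 1 or its one-shorter
--     # prefix was already marked buildable (prefixes sort strictly earlier).
--     built = set()
--     best = ""
--     for w in sorted(words):
--         if len(w) == 1 or w[:-1] in built:
--             built.add(w)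
--             if len(w) > len(best):
--                 best = w
--     return best
-- ===== Notes on version B (the rewrite author's own statement) =====
-- stated objective: alternative
-- what changed: Replaced the memoized top-down prefix recursion (dict cache + per-word recursive descent) by a sort-then-scan: process words in sorted order keeping a set of already-buildable words, so each word needs only one prefix lookup and the sorted order makes the lex tie-break automatic via a plain length comparison.
import Mathlib
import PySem

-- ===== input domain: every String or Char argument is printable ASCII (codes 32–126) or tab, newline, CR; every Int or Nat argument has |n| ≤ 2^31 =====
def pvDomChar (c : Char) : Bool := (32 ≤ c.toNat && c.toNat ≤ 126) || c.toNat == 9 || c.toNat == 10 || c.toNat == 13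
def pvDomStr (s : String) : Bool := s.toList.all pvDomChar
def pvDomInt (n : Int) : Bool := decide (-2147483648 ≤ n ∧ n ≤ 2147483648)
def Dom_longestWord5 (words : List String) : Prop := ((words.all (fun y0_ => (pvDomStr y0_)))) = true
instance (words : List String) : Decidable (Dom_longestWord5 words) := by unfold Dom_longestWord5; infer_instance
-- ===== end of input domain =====

-- B replaces A's memoized prefix recursion by a sort-then-scan with a set of buildable words (alternative
-- algorithm of similar cost; one prefix lookup per word, lex tie-break falls out of the sorted order).

-- ===== PORT A =====
-- A's can_build_dp: memoized recursion on word[:-1]; the fuel argument (called with the word's length)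
-- only makes the recursion structural — fuel 0 is reached exactly where Python recurses forever
-- (word = "" with "" in word_set), which Pre_ excludes.
def canBuildDp (wordSet : PySem.Set String) (fuel : Nat) (word : String)
    (memo : PySem.Dict String Bool) : Bool × PySem.Dict String Bool :=
  match memo.get? word with
  | some b => (b, memo)
  | none =>
    if PySem.Str.len word = 1 then
      let r := PySem.Set.contains wordSet word
      (r, memo.insert word r)
    else
      -- 'word in word_set and can_build_dp(word[:-1])' (short-circuit)
      if PySem.Set.contains wordSet word then
        match fuel with
        | 0 => (false, memo)  -- unreachable under Pre_ (Python's infinite recursion on "")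
        | f + 1 =>
          let p := canBuildDp wordSet f (PySem.Str.slice word none (some (-1))) memo
          (p.1, p.2.insert word p.1)
      else
        (false, memo.insert word false)

-- body of A's 'for word in words' loop
def stepA (wordSet : PySem.Set String) (st : PySem.Dict String Bool × String)
    (word : String) : PySem.Dict String Bool × String :=
  let r := canBuildDp wordSet word.toList.length word st.1
  if r.1 then
    if PySem.Str.len word > PySem.Str.len st.2 ∨
        (PySem.Str.len word = PySem.Str.len st.2 ∧ word < st.2) then
      (r.2, word)
    else (r.2, st.2)
  else (r.2, st.2)

def longestWord5 (words : List String) : String :=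
  (words.foldl (stepA (PySem.Set.ofList words)) (PySem.Dict.empty, "")).2

-- ===== PORT B =====
-- body of B's 'for w in sorted(words)' loop
def stepB (st : PySem.Set String × String) (w : String) : PySem.Set String × String :=
  if PySem.Str.len w = 1 ∨ PySem.Str.slice w none (some (-1)) ∈ st.1 then
    (PySem.Set.add st.1 w,
      if PySem.Str.len w > PySem.Str.len st.2 then w else st.2)
  else st

def longestWord5_alt (words : List String) : String :=
  ((PySem.List.sorted words (fun w => w)).foldl stepB (PySem.Set.empty, "")).2

-- ===== PRECONDITION & SPEC =====
-- Pre_ excludes only lists containing "" — there A's can_build_dp recurses forever on ''[:-1] == ''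
-- and raises RecursionError (returns nothing); see Raises_ below.
def Pre_longestWord5 (words : List String) : Prop := "" ∉ words
instance (words : List String) : Decidable (Pre_longestWord5 words) := by
  unfold Pre_longestWord5; infer_instance
def pvWitness_longestWord5 : List String := ["ab", "a"]

def Spec_longestWord5 (words : List String) (out : String) : Prop := out = longestWord5_alt words
instance (words : List String) (out : String) : Decidable (Spec_longestWord5 words out) := by
  unfold Spec_longestWord5; infer_instance

-- ===== CLAIM (what is proved, stated in full; the proofs are below) =====
def Claim_equal_longestWord5 : Prop := ∀ (words : List String), Dom_longestWord5 words →
  Pre_longestWord5 words → Spec_longestWord5 words (longestWord5 words)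
-- ===== LEMMAS AND PROOFS =====

-- 'w is buildable': w and all its nonempty prefixes are in ws (the specification both loops meet)
def goodS (ws : List String) (w : String) : Bool :=
  if h : w.toList.length = 0 then false
  else decide (w ∈ ws) &&
    (w.toList.length == 1 || goodS ws (String.ofList w.toList.dropLast))
termination_by w.toList.length
decreasing_by simp only [String.toList_ofList, List.length_dropLast]; omega

lemma goodS_of_len_zero (ws : List String) (w : String) (h : w.toList.length = 0) :
    goodS ws w = false := by
  rw [goodS.eq_def, dif_pos h]

lemma goodS_mem {ws : List String} {w : String} (h : goodS ws w = true) : w ∈ ws := by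
  rw [goodS.eq_def] at h
  split at h
  · simp at h
  · simp at h; exact h.1

lemma goodS_of_len_one (ws : List String) (w : String) (h : w.toList.length = 1) :
    goodS ws w = decide (w ∈ ws) := by
  rw [goodS.eq_def, dif_neg (by omega : ¬ w.toList.length = 0)]
  rw [show (w.toList.length == 1) = true from beq_iff_eq.mpr h]
  rw [Bool.true_or, Bool.and_true]

lemma goodS_of_len_big (ws : List String) (w : String) (h : 2 ≤ w.toList.length) :
    goodS ws w = (decide (w ∈ ws) && goodS ws (String.ofList w.toList.dropLast)) := by
  rw [goodS.eq_def, dif_neg (by omega : ¬ w.toList.length = 0)]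
  rw [show (w.toList.length == 1) = false from beq_eq_false_iff_ne.mpr (by omega)]
  rw [Bool.false_or]

lemma goodS_of_not_mem {ws : List String} {w : String} (h : w ∉ ws) :
    goodS ws w = false := by
  rw [goodS.eq_def]
  split
  · rfl
  · simp [h]

lemma lt_append_of_ne_nil (xs ys : List Char) (h : ys ≠ []) : xs < xs ++ ys := by
  show List.Lex (· < ·) xs (xs ++ ys)
  induction xs with
  | nil =>
    cases ys with
    | nil => exact absurd rfl h
    | cons a t => exact List.Lex.nil
  | cons a t ih => exact List.Lex.cons ih

lemma dropLast_lt (w : String) (h : w.toList ≠ []) :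
    String.ofList w.toList.dropLast < w := by
  rw [String.lt_iff_toList_lt]
  simp only [String.toList_ofList]
  conv_rhs => rw [← List.dropLast_append_getLast h]
  exact lt_append_of_ne_nil _ _ (by simp)

lemma slice_eq_dropLast (w : String) :
    PySem.Str.slice w none (some (-1)) = String.ofList w.toList.dropLast := by
  apply String.toList_inj.mp
  rw [PySem.Str.slice_to_neg_one]
  simp

lemma contains_ofList_eq (ws : List String) (w : String) :
    PySem.Set.contains (PySem.Set.ofList ws) w = decide (w ∈ ws) := by
  by_cases h : w ∈ ws
  · simp only [h, decide_true]
    exact (PySem.Set.contains_iff _ _).mpr ((PySem.Set.mem_ofList ws w).mpr h)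
  · simp only [h, decide_false]
    cases hc : PySem.Set.contains (PySem.Set.ofList ws) w
    · rfl
    · exact absurd ((PySem.Set.mem_ofList ws w).mp ((PySem.Set.contains_iff _ _).mp hc)) h

lemma str_len_eq (w : String) : PySem.Str.len w = (w.toList.length : Int) := by
  simp [PySem.Str.len_eq]

lemma str_len_empty : PySem.Str.len "" = 0 := by decide

lemma toList_empty_iff (w : String) : w.toList = [] ↔ w = "" := by
  constructor
  · intro h; exact String.toList_inj.mp (by simp [h])
  · intro h; simp [h]

-- A's current best m is 'beaten' by v when A's replacement condition fires
def Beat (v m : String) : Prop :=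
  PySem.Str.len v > PySem.Str.len m ∨ (PySem.Str.len v = PySem.Str.len m ∧ v < m)

-- invariant of both loops: m is the best buildable word among the processed prefix p
def BestOf (ws p : List String) (m : String) : Prop :=
  (m = "" ∧ ∀ v ∈ p, goodS ws v = false) ∨
  (m ∈ p ∧ goodS ws m = true ∧ ∀ v ∈ p, goodS ws v = true → ¬ Beat v m)

def MemoOK (ws : List String) (memo : PySem.Dict String Bool) : Prop :=
  ∀ k b, memo.get? k = some b → b = goodS ws k

lemma beat_irrefl (w : String) : ¬ Beat w w := by
  rintro (h | ⟨_, h⟩)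
  · omega
  · exact lt_irrefl _ h

lemma not_beat_of_not_beat_of_beat {v m w : String} (h1 : ¬ Beat v m) (h2 : Beat w m) :
    ¬ Beat v w := by
  unfold Beat at *
  push_neg at h1
  rintro (h | ⟨he, hlt⟩)
  · rcases h2 with h2 | ⟨h2, _⟩
    · have := h1.1; omega
    · have := h1.1; omega
  · rcases h2 with h2 | ⟨h2e, h2lt⟩
    · have := h1.1; omega
    · have hv := h1.2 (by omega)
      exact absurd (lt_trans hlt h2lt) (not_lt.mpr hv)

lemma goodS_len_pos {ws : List String} {w : String} (hw : goodS ws w = true) :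
    w.toList.length ≠ 0 := by
  intro h0; rw [goodS_of_len_zero ws w h0] at hw; cases hw

lemma bestOf_skip {ws p : List String} {m w : String} (hw : goodS ws w = false)
    (h : BestOf ws p m) : BestOf ws (p ++ [w]) m := by
  rcases h with ⟨hm, hall⟩ | ⟨hm, hg, hall⟩
  · left
    refine ⟨hm, fun v hv => ?_⟩
    rcases List.mem_append.mp hv with hv | hv
    · exact hall v hv
    · simp at hv; subst hv; exact hw
  · right
    refine ⟨List.mem_append.mpr (Or.inl hm), hg, fun v hv hgv => ?_⟩
    rcases List.mem_append.mp hv with hv | hv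
    · exact hall v hv hgv
    · simp at hv; subst hv; rw [hw] at hgv; cases hgv

lemma bestOf_take {ws p : List String} {m w : String} (hw : goodS ws w = true)
    (hb : Beat w m) (h : BestOf ws p m) : BestOf ws (p ++ [w]) w := by
  right
  refine ⟨List.mem_append.mpr (Or.inr (by simp)), hw, fun v hv hgv => ?_⟩
  rcases List.mem_append.mp hv with hv | hv
  · rcases h with ⟨_, hall⟩ | ⟨_, _, hall⟩
    · rw [hall v hv] at hgv; cases hgv
    · exact not_beat_of_not_beat_of_beat (hall v hv hgv) hb
  · simp at hv; subst hv; exact beat_irrefl _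

lemma bestOf_keep {ws p : List String} {m w : String} (hw : goodS ws w = true)
    (hb : ¬ Beat w m) (h : BestOf ws p m) : BestOf ws (p ++ [w]) m := by
  rcases h with ⟨hm, hall⟩ | ⟨hm, hg, hall⟩
  · exfalso
    subst hm
    apply hb
    left
    rw [str_len_eq, str_len_empty]
    have := goodS_len_pos hw
    omega
  · right
    refine ⟨List.mem_append.mpr (Or.inl hm), hg, fun v hv hgv => ?_⟩
    rcases List.mem_append.mp hv with hv | hv
    · exact hall v hv hgv
    · simp at hv; subst hv; exact hb

-- B-side variants: on a sorted list the plain length test maintains the same invariant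
lemma bestOf_takeB {ws p : List String} {m w : String} (hw : goodS ws w = true)
    (hlen : PySem.Str.len w > PySem.Str.len m) (h : BestOf ws p m) :
    BestOf ws (p ++ [w]) w := by
  right
  refine ⟨List.mem_append.mpr (Or.inr (by simp)), hw, fun v hv hgv => ?_⟩
  rcases List.mem_append.mp hv with hv | hv
  · rcases h with ⟨_, hall⟩ | ⟨_, _, hall⟩
    · rw [hall v hv] at hgv; cases hgv
    · have hnb := hall v hv hgv
      unfold Beat at *
      push_neg at hnb
      rintro (hc | ⟨hc, _⟩)
      · have := hnb.1; omega
      · have := hnb.1; omega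
  · simp at hv; subst hv; exact beat_irrefl _

lemma bestOf_keepB {ws p : List String} {m w : String} (hw : goodS ws w = true)
    (hlen : ¬ PySem.Str.len w > PySem.Str.len m) (hle : ∀ v ∈ p, v ≤ w)
    (h : BestOf ws p m) : BestOf ws (p ++ [w]) m := by
  rcases h with ⟨hm, hall⟩ | ⟨hm, hg, hall⟩
  · exfalso
    subst hm
    apply hlen
    rw [str_len_eq, str_len_empty]
    have := goodS_len_pos hw
    omega
  · right
    refine ⟨List.mem_append.mpr (Or.inl hm), hg, fun v hv hgv => ?_⟩
    rcases List.mem_append.mp hv with hv | hv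
    · exact hall v hv hgv
    · simp at hv; subst hv
      rintro (hc | ⟨hc, hlt⟩)
      · exact hlen hc
      · exact absurd hlt (not_lt.mpr (hle m hm))

lemma bestOf_unique {ws p1 p2 : List String} {m1 m2 : String}
    (hmem : ∀ v, v ∈ p1 ↔ v ∈ p2)
    (h1 : BestOf ws p1 m1) (h2 : BestOf ws p2 m2) : m1 = m2 := by
  rcases h1 with ⟨e1, hall1⟩ | ⟨hm1, hg1, hall1⟩
  · rcases h2 with ⟨e2, _⟩ | ⟨hm2, hg2, _⟩
    · rw [e1, e2]
    · rw [hall1 m2 ((hmem m2).mpr hm2)] at hg2; cases hg2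
  · rcases h2 with ⟨e2, hall2⟩ | ⟨hm2, hg2, hall2⟩
    · rw [hall2 m1 ((hmem m1).mp hm1)] at hg1; cases hg1
    · have hb1 := hall1 m2 ((hmem m2).mpr hm2) hg2
      have hb2 := hall2 m1 ((hmem m1).mp hm1) hg1
      unfold Beat at hb1 hb2
      push_neg at hb1 hb2
      have hlen : PySem.Str.len m1 = PySem.Str.len m2 := by
        have := hb1.1; have := hb2.1; omega
      exact le_antisymm (hb1.2 hlen.symm) (hb2.2 hlen)

lemma memoOK_insert {ws : List String} {memo : PySem.Dict String Bool} {w : String}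
    {b : Bool} (h : MemoOK ws memo) (hv : b = goodS ws w) :
    MemoOK ws (memo.insert w b) := by
  intro k v hk
  rw [PySem.Dict.get?_insert] at hk
  split at hk
  · rename_i he; cases hk; rw [hv, he]
  · exact h k v hk

lemma len_int_one_iff (w : String) : PySem.Str.len w = 1 ↔ w.toList.length = 1 := by
  rw [str_len_eq]; omega

lemma canBuild_spec (ws : List String) (hne : "" ∉ ws) :
    ∀ (fuel : Nat) (word : String) (memo : PySem.Dict String Bool),
      word.toList.length ≤ fuel + 1 → MemoOK ws memo →
      (canBuildDp (PySem.Set.ofList ws) fuel word memo).1 = goodS ws word ∧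
      MemoOK ws (canBuildDp (PySem.Set.ofList ws) fuel word memo).2 := by
  intro fuel
  induction fuel with
  | zero =>
    intro word memo hf hm
    unfold canBuildDp
    cases hmw : memo.get? word with
    | some b => exact ⟨hm word b hmw, hm⟩
    | none =>
      by_cases h1 : PySem.Str.len word = 1
      · have hl1 := (len_int_one_iff word).mp h1
        simp only [if_pos h1]
        have he : PySem.Set.contains (PySem.Set.ofList ws) word = goodS ws word := by
          rw [goodS_of_len_one ws word hl1, contains_ofList_eq]
        exact ⟨he, memoOK_insert hm he⟩
      · simp only [if_neg h1]
        cases hc : PySem.Set.contains (PySem.Set.ofList ws) word with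
        | true =>
          exfalso
          have hmem : word ∈ ws := by
            rw [contains_ofList_eq] at hc; exact of_decide_eq_true hc
          have hne' : word.toList ≠ [] := by
            intro h0; exact hne (((toList_empty_iff word).mp h0) ▸ hmem)
          have : word.toList.length = 1 := by
            have := List.length_pos_iff.mpr hne'
            omega
          exact h1 ((len_int_one_iff word).mpr this)
        | false =>
          simp only [Bool.false_eq_true, if_false]
          have hmem : word ∉ ws := by
            rw [contains_ofList_eq] at hc
            exact of_decide_eq_false hc
          exact ⟨(goodS_of_not_mem hmem).symm, memoOK_insert hm (goodS_of_not_mem hmem).symm⟩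
  | succ f ih =>
    intro word memo hf hm
    unfold canBuildDp
    cases hmw : memo.get? word with
    | some b => exact ⟨hm word b hmw, hm⟩
    | none =>
      by_cases h1 : PySem.Str.len word = 1
      · have hl1 := (len_int_one_iff word).mp h1
        simp only [if_pos h1]
        have he : PySem.Set.contains (PySem.Set.ofList ws) word = goodS ws word := by
          rw [goodS_of_len_one ws word hl1, contains_ofList_eq]
        exact ⟨he, memoOK_insert hm he⟩
      · simp only [if_neg h1]
        cases hc : PySem.Set.contains (PySem.Set.ofList ws) word with
        | true =>
          simp only
          have hmem : word ∈ ws := by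
            rw [contains_ofList_eq] at hc; exact of_decide_eq_true hc
          have hne' : word.toList ≠ [] := by
            intro h0; exact hne (((toList_empty_iff word).mp h0) ▸ hmem)
          have hbig : 2 ≤ word.toList.length := by
            have := List.length_pos_iff.mpr hne'
            have hn1 : word.toList.length ≠ 1 := fun hh => h1 ((len_int_one_iff word).mpr hh)
            omega
          have hfl : (PySem.Str.slice word none (some (-1))).toList.length ≤ f + 1 := by
            rw [slice_eq_dropLast]
            simp only [String.toList_ofList, List.length_dropLast]
            omega
          have hrec := ih (PySem.Str.slice word none (some (-1))) memo hfl hm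
          have hgw : goodS ws word =
              goodS ws (String.ofList word.toList.dropLast) := by
            rw [goodS_of_len_big ws word hbig]
            simp [hmem]
          have hp1 : (canBuildDp (PySem.Set.ofList ws) f
              (PySem.Str.slice word none (some (-1))) memo).1 = goodS ws word := by
            rw [hrec.1, slice_eq_dropLast, ← hgw]
          exact ⟨hp1, memoOK_insert hrec.2 hp1⟩
        | false =>
          simp only [Bool.false_eq_true, if_false]
          have hmem : word ∉ ws := by
            rw [contains_ofList_eq] at hc
            exact of_decide_eq_false hc
          exact ⟨(goodS_of_not_mem hmem).symm, memoOK_insert hm (goodS_of_not_mem hmem).symm⟩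

lemma foldA (ws : List String) (hne : "" ∉ ws) :
    ∀ (l p : List String) (memo : PySem.Dict String Bool) (longest : String),
      MemoOK ws memo → BestOf ws p longest →
      BestOf ws (p ++ l) (l.foldl (stepA (PySem.Set.ofList ws)) (memo, longest)).2 := by
  intro l
  induction l with
  | nil => intro p memo longest _ hb; simpa using hb
  | cons w rest ih =>
    intro p memo longest hm hb
    have hlist : p ++ w :: rest = (p ++ [w]) ++ rest := by simp
    rw [hlist, List.foldl_cons]
    have hcb := canBuild_spec ws hne w.toList.length w memo (by omega) hm
    cases hg : goodS ws w with
    | true =>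
      by_cases hbeat : PySem.Str.len w > PySem.Str.len longest ∨
          (PySem.Str.len w = PySem.Str.len longest ∧ w < longest)
      · have hstep : stepA (PySem.Set.ofList ws) (memo, longest) w =
            ((canBuildDp (PySem.Set.ofList ws) w.toList.length w memo).2, w) := by
          have hr : (canBuildDp (PySem.Set.ofList ws) w.toList.length w memo).1 = true := by
            rw [hcb.1, hg]
          simp only [stepA]
          rw [hr, if_pos rfl, if_pos hbeat]
        rw [hstep]
        exact ih (p ++ [w]) _ w hcb.2 (bestOf_take hg hbeat hb)
      · have hstep : stepA (PySem.Set.ofList ws) (memo, longest) w =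
            ((canBuildDp (PySem.Set.ofList ws) w.toList.length w memo).2, longest) := by
          have hr : (canBuildDp (PySem.Set.ofList ws) w.toList.length w memo).1 = true := by
            rw [hcb.1, hg]
          simp only [stepA]
          rw [hr, if_pos rfl, if_neg hbeat]
        rw [hstep]
        exact ih (p ++ [w]) _ longest hcb.2 (bestOf_keep hg hbeat hb)
    | false =>
      have hstep : stepA (PySem.Set.ofList ws) (memo, longest) w =
          ((canBuildDp (PySem.Set.ofList ws) w.toList.length w memo).2, longest) := by
        have hr : (canBuildDp (PySem.Set.ofList ws) w.toList.length w memo).1 = false := by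
          rw [hcb.1, hg]
        simp only [stepA]
        rw [hr]
        simp only [Bool.false_eq_true, if_false]
      rw [hstep]
      exact ih (p ++ [w]) _ longest hcb.2 (bestOf_skip hg hb)

lemma foldB (ws : List String) (hne : "" ∉ ws) :
    ∀ (l p : List String) (built : PySem.Set String) (best : String),
      (p ++ l).Pairwise (· ≤ ·) →
      (∀ v, v ∈ ws ↔ v ∈ p ++ l) →
      (∀ v, v ∈ built ↔ (v ∈ p ∧ goodS ws v = true)) →
      BestOf ws p best →
      BestOf ws (p ++ l) (l.foldl stepB (built, best)).2 := by
  intro l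
  induction l with
  | nil => intro p built best _ _ _ hb; simpa using hb
  | cons w rest ih =>
    intro p built best hpair hmem hbuilt hb
    have hlist : p ++ w :: rest = (p ++ [w]) ++ rest := by simp
    have hwmem : w ∈ ws := (hmem w).mpr (by simp)
    have hwne : w.toList ≠ [] := by
      intro h0; exact hne (((toList_empty_iff w).mp h0) ▸ hwmem)
    have hle : ∀ v ∈ p, v ≤ w := by
      intro v hv
      exact (List.pairwise_append.mp hpair).2.2 v hv w (by simp)
    have hpair' : ((p ++ [w]) ++ rest).Pairwise (· ≤ ·) := by rw [← hlist]; exact hpair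
    have hmem' : ∀ v, v ∈ ws ↔ v ∈ (p ++ [w]) ++ rest := by
      intro v; rw [← hlist]; exact hmem v
    have hwle_rest : ∀ x ∈ rest, w ≤ x := by
      have := (List.pairwise_append.mp hpair).2.1
      exact (List.pairwise_cons.mp this).1
    -- B's test is exactly buildability, on a sorted traversal
    have hcond : (PySem.Str.len w = 1 ∨ PySem.Str.slice w none (some (-1)) ∈ built) ↔
        goodS ws w = true := by
      by_cases h1 : w.toList.length = 1
      · have hg : goodS ws w = true := by
          rw [goodS_of_len_one ws w h1]; simp [hwmem]
        exact iff_of_true (Or.inl ((len_int_one_iff w).mpr h1)) hg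
      · have hbig : 2 ≤ w.toList.length := by
          have := List.length_pos_iff.mpr hwne
          omega
        have h1' : ¬ PySem.Str.len w = 1 := fun hh => h1 ((len_int_one_iff w).mp hh)
        rw [or_iff_right h1', slice_eq_dropLast, hbuilt,
          goodS_of_len_big ws w hbig]
        simp only [hwmem, decide_true, Bool.true_and]
        constructor
        · exact fun h => h.2
        · intro hgd
          refine ⟨?_, hgd⟩
          have hdmem : String.ofList w.toList.dropLast ∈ ws := goodS_mem hgd
          have hdlt : String.ofList w.toList.dropLast < w := dropLast_lt w hwne
          rcases List.mem_append.mp ((hmem _).mp hdmem) with hd | hd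
          · exact hd
          · exfalso
            rcases List.mem_cons.mp hd with hd | hd
            · exact absurd hdlt (by rw [hd]; exact lt_irrefl w)
            · exact absurd hdlt (not_lt.mpr (hwle_rest _ hd))
    rw [hlist, List.foldl_cons]
    cases hg : goodS ws w with
    | true =>
      have hc := hcond.mpr hg
      have hbuilt' : ∀ v, v ∈ PySem.Set.add built w ↔
          (v ∈ p ++ [w] ∧ goodS ws v = true) := by
        intro v
        rw [PySem.Set.mem_add, hbuilt, List.mem_append]
        constructor
        · rintro (⟨hv, hgv⟩ | hv)
          · exact ⟨Or.inl hv, hgv⟩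
          · subst hv; exact ⟨Or.inr (by simp), hg⟩
        · rintro ⟨hv | hv, hgv⟩
          · exact Or.inl ⟨hv, hgv⟩
          · simp at hv; exact Or.inr hv
      by_cases hlen : PySem.Str.len w > PySem.Str.len best
      · have hstep : stepB (built, best) w = (PySem.Set.add built w, w) := by
          simp only [stepB]
          rw [if_pos hc, if_pos hlen]
        rw [hstep]
        exact ih (p ++ [w]) _ w hpair' hmem' hbuilt' (bestOf_takeB hg hlen hb)
      · have hstep : stepB (built, best) w = (PySem.Set.add built w, best) := by
          simp only [stepB]
          rw [if_pos hc, if_neg hlen]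
        rw [hstep]
        exact ih (p ++ [w]) _ best hpair' hmem' hbuilt' (bestOf_keepB hg hlen hle hb)
    | false =>
      have hc : ¬ (PySem.Str.len w = 1 ∨ PySem.Str.slice w none (some (-1)) ∈ built) := by
        intro h; rw [hcond.mp h] at hg; cases hg
      have hstep : stepB (built, best) w = (built, best) := by
        simp only [stepB]
        rw [if_neg hc]
      rw [hstep]
      have hbuilt' : ∀ v, v ∈ built ↔ (v ∈ p ++ [w] ∧ goodS ws v = true) := by
        intro v
        rw [hbuilt, List.mem_append]
        constructor
        · rintro ⟨hv, hgv⟩; exact ⟨Or.inl hv, hgv⟩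
        · rintro ⟨hv | hv, hgv⟩
          · exact ⟨hv, hgv⟩
          · simp at hv; subst hv; rw [hg] at hgv; cases hgv
      exact ih (p ++ [w]) _ best hpair' hmem' hbuilt' (bestOf_skip hg hb)

-- ===== VERDICT (by name: the statement is the Claim_ definition above) =====
theorem longestWord5_spec : Claim_equal_longestWord5 := by
  intro words _ hpre
  unfold Spec_longestWord5 longestWord5 longestWord5_alt
  have hA := foldA words hpre words [] PySem.Dict.empty ""
    (fun k b hk => by rw [PySem.Dict.get?_empty] at hk; cases hk)
    (Or.inl ⟨rfl, by simp⟩)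
  have hB := foldB words hpre (PySem.List.sorted words (fun w => w)) [] PySem.Set.empty ""
    (by simpa using PySem.List.sorted_pairwise words (fun w => w))
    (by intro v; simp [PySem.List.mem_sorted])
    (by intro v; simp [PySem.Set.empty])
    (Or.inl ⟨rfl, by simp⟩)
  simp only [List.nil_append] at hA hB
  exact bestOf_unique (fun v => by simp [PySem.List.mem_sorted]) hA hB
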